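-- pv_equiv track=rewrite | github.com/nekojiji22/WebHIRAU | HIRAU.py | roadDict
-- ===== SOURCE A (Python) =====
-- def roadDict(route_list):
--   road_dict = {}
--   r = 0
--   for route in route_list:
--     for l in range(len(route)-1):
--       road = ( min(route[l],route[l+1]), max(route[l],route[l+1]) )
--       if road not in road_dict.keys():
--         road_dict[road] = r
--         r += 1
--   return road_dict
-- ===== SOURCE B (Python) =====
-- def roadDict(route_list):
--     # Collect the normalized edge stream, then find each edge's first position by a
--     # single BACKWARD overwrite pass (last write wins => earliest position, no
--     # membership test), then rank edges by sorting on that position.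
--     edges = [(min(a, b), max(a, b)) for route in route_list for a, b in zip(route, route[1:])]
--     first = {}
--     for pos in range(len(edges) - 1, -1, -1):
--         first[edges[pos]] = pos
--     order = sorted(first, key=first.get)
--     return {e: i for i, e in enumerate(order)}
-- ===== Notes on version B (the rewrite author's own statement) =====
-- stated objective: alternative
-- what changed: Replaced A's fused forward pass (membership test + running counter mutating the dict) with a three-stage algorithm: collect the normalized edge stream, find each edge's first-occurrence position by a single BACKWARD overwrite pass over positions (last write wins, no membership test), then sort the distinct edges by that position and enumerate to assign indices.
import Mathlib
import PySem

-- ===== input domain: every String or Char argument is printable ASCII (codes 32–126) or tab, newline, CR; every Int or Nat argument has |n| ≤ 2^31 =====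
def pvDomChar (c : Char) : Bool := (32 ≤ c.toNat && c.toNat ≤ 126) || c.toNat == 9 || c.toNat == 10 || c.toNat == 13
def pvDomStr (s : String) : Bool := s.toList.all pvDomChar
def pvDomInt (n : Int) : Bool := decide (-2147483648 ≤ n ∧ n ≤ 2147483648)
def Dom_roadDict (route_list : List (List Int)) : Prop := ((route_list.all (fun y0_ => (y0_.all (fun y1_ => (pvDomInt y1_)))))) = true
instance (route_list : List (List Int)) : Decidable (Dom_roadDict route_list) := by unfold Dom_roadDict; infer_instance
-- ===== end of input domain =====

-- B replaces A's fused forward pass (membership test + running counter) by collect → backward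
-- overwrite pass recording first positions → sort by position → enumerate (alternative algorithm).

-- ===== PORT A =====
-- indices l, l+1 produced by range(len(route)-1) are always in bounds, so pyGetD's default 0 is never used
def roadDict (route_list : List (List Int)) : List (Int × Int × Int) :=
  let st := route_list.foldl
    (fun (st : PySem.Dict (Int × Int) Int × Int) route =>
      (PySem.List.pyRange 0 ((route.length : Int) - 1) 1).foldl
        (fun st l =>
          let road := (min (PySem.List.pyGetD route l 0) (PySem.List.pyGetD route (l + 1) 0),
                       max (PySem.List.pyGetD route l 0) (PySem.List.pyGetD route (l + 1) 0))
          if st.1.contains road then st else (st.1.insert road st.2, st.2 + 1))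
        st)
    (PySem.Dict.empty, 0)
  st.1.items.map (fun p => (p.1.1, p.1.2, p.2))

-- ===== PORT B =====
-- indices produced by range(len(edges)-1, -1, -1) are always in bounds, so pyGetD's default (0,0) is never used
def roadDict_alt (route_list : List (List Int)) : List (Int × Int × Int) :=
  let edges := route_list.flatMap
    (fun route => (route.zip route.tail).map (fun p => (min p.1 p.2, max p.1 p.2)))
  let first := (PySem.List.pyRange ((edges.length : Int) - 1) (-1) (-1)).foldl
    (fun (d : PySem.Dict (Int × Int) Int) pos => d.insert (PySem.List.pyGetD edges pos (0, 0)) pos)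
    PySem.Dict.empty
  let order := PySem.List.sorted first.keys (fun e => first.getD e 0) false
  (PySem.List.enumerate order 0).map (fun p => (p.2.1, p.2.2, p.1))

-- ===== PRECONDITION & SPEC =====
def Spec_roadDict (route_list : List (List Int)) (out : List (Int × Int × Int)) : Prop := out = roadDict_alt route_list
instance (route_list : List (List Int)) (out : List (Int × Int × Int)) : Decidable (Spec_roadDict route_list out) := by unfold Spec_roadDict; infer_instance

-- ===== CLAIM (what is proved, stated in full; the proofs are below) =====
def Claim_equal_roadDict : Prop := ∀ (route_list : List (List Int)), Dom_roadDict route_list → Spec_roadDict route_list (roadDict route_list)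

-- ===== LEMMAS AND PROOFS =====

-- the step of A's dict loop, on one normalized edge
def pvStep (st : PySem.Dict (Int × Int) Int × Int) (e : Int × Int) :
    PySem.Dict (Int × Int) Int × Int :=
  if st.1.contains e then st else (st.1.insert e st.2, st.2 + 1)

-- the dict A has built after recording the distinct edges ks (in order): key ↦ its index
def pvMkD (ks : List (Int × Int)) : PySem.Dict (Int × Int) Int :=
  PySem.Dict.mk ((PySem.List.enumerate ks 0).map (fun p => (p.2, p.1)))

lemma pvGetD_cons_succ (x : Int) (xs : List Int) (i : Int) (hi : 0 ≤ i) (d : Int) :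
    PySem.List.pyGetD (x :: xs) (i + 1) d = PySem.List.pyGetD xs i d := by
  obtain ⟨n, rfl⟩ := Int.eq_ofNat_of_zero_le hi
  simp [PySem.List.pyGetD, PySem.List.pyGet?_cons_succ]

lemma pvShift {σ : Type} (b : Int) (f : σ → Int → σ) (st : σ) :
    (PySem.List.pyRange 1 (b + 1) 1).foldl f st
      = (PySem.List.pyRange 0 b 1).foldl (fun s l => f s (l + 1)) st := by
  rw [PySem.List.pyRange_one, PySem.List.pyRange_one]
  have h : (b + 1 - 1) = b - 0 := by ring
  rw [h, List.foldl_map, List.foldl_map]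
  apply PySem.List.foldl_congr_mem
  intro acc x _
  congr 1
  ring

lemma pvInner {σ : Type} (f : σ → Int → Int → σ) :
    ∀ (route : List Int) (st : σ),
      (PySem.List.pyRange 0 ((route.length : Int) - 1) 1).foldl
          (fun s l => f s (PySem.List.pyGetD route l 0) (PySem.List.pyGetD route (l + 1) 0)) st
        = (route.zip route.tail).foldl (fun s p => f s p.1 p.2) st := by
  intro route
  induction route with
  | nil => intro st; rw [PySem.List.pyRange_one_eq_nil (by simp)]; simp
  | cons a t ih =>
    intro st
    cases t with
    | nil => rw [PySem.List.pyRange_one_eq_nil (by simp)]; simp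
    | cons b t2 =>
      have hlen : ((a :: b :: t2).length : Int) - 1 = ((b :: t2).length : Int) := by
        push_cast [List.length_cons]; ring
      rw [hlen, PySem.List.pyRange_one_cons (by exact_mod_cast Nat.succ_pos (t2.length))]
      simp only [List.foldl_cons]
      have h0 : PySem.List.pyGetD (a :: b :: t2) 0 0 = a := by
        simp [PySem.List.pyGetD_zero_cons]
      have h1 : PySem.List.pyGetD (a :: b :: t2) (0 + 1) 0 = b := by
        rw [pvGetD_cons_succ a _ 0 le_rfl]; simp [PySem.List.pyGetD_zero_cons]
      rw [h0, h1]
      rw [show ((0:Int) + 1) = 1 from by norm_num,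
        show ((b :: t2).length : Int) = (((b :: t2).length : Int) - 1) + 1 from by ring, pvShift]
      rw [PySem.List.foldl_congr_mem (g := fun s l =>
        f s (PySem.List.pyGetD (b :: t2) l 0) (PySem.List.pyGetD (b :: t2) (l + 1) 0))]
      · rw [ih]; simp
      · intro acc x hx
        have hx0 : 0 ≤ x := by
          have := (PySem.List.mem_pyRange_one.mp hx).1; omega
        rw [pvGetD_cons_succ a _ x hx0, pvGetD_cons_succ a _ (x + 1) (by omega)]

lemma pvFoldlFlatMap {α β σ : Type} (g : α → List β) (f : σ → β → σ) :
    ∀ (l : List α) (st : σ),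
      l.foldl (fun s x => (g x).foldl f s) st = (l.flatMap g).foldl f st := by
  intro l
  induction l with
  | nil => intro st; simp
  | cons x xs ih => intro st; simp [List.foldl_append, ih]

lemma pvKeysMkD (ks : List (Int × Int)) : (pvMkD ks).keys = ks := by
  show ((PySem.List.enumerate ks 0).map (fun p => (p.2, p.1))).map (·.1) = ks
  rw [List.map_map]
  exact PySem.List.map_snd_enumerate ks 0

lemma pvCore :
    ∀ (es : List (Int × Int)) (ks : List (Int × Int)),
      es.foldl pvStep (pvMkD ks, (ks.length : Int))
        = (pvMkD (es.foldl PySem.Set.add ks), ((es.foldl PySem.Set.add ks).length : Int)) := by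
  intro es
  induction es with
  | nil => intro ks; simp
  | cons e es ih =>
    intro ks
    have hcont : (pvMkD ks).contains e = decide (e ∈ ks) := by
      rw [PySem.Dict.contains_eq_decide_mem_keys, pvKeysMkD]
    by_cases hmem : e ∈ ks
    · have h1 : pvStep (pvMkD ks, (ks.length : Int)) e = (pvMkD ks, (ks.length : Int)) := by
        simp [pvStep, hcont, hmem]
      have h2 : PySem.Set.add ks e = ks := PySem.Set.add_of_mem hmem
      simp only [List.foldl_cons, h1, h2, ih]
    · have h1 : pvStep (pvMkD ks, (ks.length : Int)) e
          = (pvMkD (ks ++ [e]), ((ks ++ [e]).length : Int)) := by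
        have hins : (pvMkD ks).insert e (ks.length : Int) = pvMkD (ks ++ [e]) := by
          apply PySem.Dict.ext
          rw [PySem.Dict.items_insert, if_neg (by simp [hcont, hmem])]
          show ((PySem.List.enumerate ks 0).map (fun p => (p.2, p.1))) ++ [(e, (ks.length : Int))]
              = (PySem.List.enumerate (ks ++ [e]) 0).map (fun p => (p.2, p.1))
          rw [PySem.List.enumerate_append]
          simp [PySem.List.enumerate_cons, PySem.List.enumerate_nil]
        simp [pvStep, hcont, hmem, hins]
      have h2 : PySem.Set.add ks e = ks ++ [e] := PySem.Set.add_of_not_mem hmem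
      simp only [List.foldl_cons, h1, h2, ih]

lemma pvMkDNil : pvMkD [] = PySem.Dict.empty := by
  apply PySem.Dict.ext
  simp [pvMkD, PySem.List.enumerate_nil, PySem.Dict.empty]

-- A's result, in closed form: the enumerated ordered dedup of the edge stream
lemma pvA_closed (route_list : List (List Int)) :
    roadDict route_list
      = (PySem.List.enumerate
          (PySem.List.dedup (route_list.flatMap
            (fun route => (route.zip route.tail).map (fun p => (min p.1 p.2, max p.1 p.2))))) 0).map
          (fun p => (p.2.1, p.2.2, p.1)) := by
  unfold roadDict
  simp only []
  have hinner : ∀ (route : List Int) (st : PySem.Dict (Int × Int) Int × Int),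
      (PySem.List.pyRange 0 ((route.length : Int) - 1) 1).foldl
        (fun st l =>
          if st.1.contains (min (PySem.List.pyGetD route l 0) (PySem.List.pyGetD route (l + 1) 0),
                            max (PySem.List.pyGetD route l 0) (PySem.List.pyGetD route (l + 1) 0))
          then st
          else (st.1.insert (min (PySem.List.pyGetD route l 0) (PySem.List.pyGetD route (l + 1) 0),
                             max (PySem.List.pyGetD route l 0) (PySem.List.pyGetD route (l + 1) 0)) st.2,
                st.2 + 1)) st
        = ((route.zip route.tail).map (fun p => (min p.1 p.2, max p.1 p.2))).foldl pvStep st := by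
    intro route st
    rw [List.foldl_map]
    exact pvInner (fun s x y => pvStep s (min x y, max x y)) route st
  have h1 := PySem.List.foldl_congr_mem route_list _ _
    ((PySem.Dict.empty : PySem.Dict (Int × Int) Int), (0 : Int))
    (fun st route _ => hinner route st)
  rw [h1]
  rw [pvFoldlFlatMap (fun route => (route.zip route.tail).map (fun p => (min p.1 p.2, max p.1 p.2)))
    pvStep route_list ((PySem.Dict.empty : PySem.Dict (Int × Int) Int), (0 : Int))]
  rw [show ((PySem.Dict.empty : PySem.Dict (Int × Int) Int), (0 : Int))
        = (pvMkD [], (([] : List (Int × Int)).length : Int)) by rw [pvMkDNil]; rfl]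
  rw [pvCore]
  rw [PySem.List.dedup_eq_ofList, PySem.Set.ofList_eq_foldl]
  simp only [pvMkD, List.map_map]
  rfl

-- B's backward pass over enumerated positions: final lookup of e is its FIRST position in es
lemma pvFirstGetD (e : Int × Int) :
    ∀ (es : List (Int × Int)) (s : Int) (d : PySem.Dict (Int × Int) Int),
      (((PySem.List.enumerate es s).reverse).foldl
          (fun (d : PySem.Dict (Int × Int) Int) p => d.insert p.2 p.1) d).getD e 0
        = if e ∈ es then s + (es.idxOf e : Int) else d.getD e 0 := by
  intro es
  induction es with
  | nil => intro s d; simp [PySem.List.enumerate_nil]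
  | cons x t ih =>
    intro s d
    rw [PySem.List.enumerate_cons, List.reverse_cons, List.foldl_append]
    simp only [List.foldl_cons, List.foldl_nil]
    rw [PySem.Dict.getD_insert]
    by_cases hex : e = x
    · subst hex
      simp [List.idxOf_cons_self]
    · rw [if_neg hex, ih]
      by_cases hmem : e ∈ t
      · rw [if_pos hmem, if_pos (by simp [hmem]), List.idxOf_cons_ne _ (Ne.symm hex)]
        push_cast
        ring
      · rw [if_neg hmem, if_neg (by simp [hex, hmem])]

-- keys of B's backward pass: first-insertion order of the processed (position, edge) pairs
lemma pvFirstKeys (ps : List (Int × (Int × Int))) (d : PySem.Dict (Int × Int) Int) :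
    ((ps.foldl (fun (d : PySem.Dict (Int × Int) Int) p => d.insert p.2 p.1) d).keys)
      = PySem.Set.update d.keys (ps.map (·.2)) :=
  PySem.Dict.keys_foldl_insert_key ps (·.2) (fun _ p => p.1) d

-- the ordered dedup is strictly increasing in first-occurrence index
lemma pvDedupPairwise :
    ∀ (xs : List (Int × Int)),
      (PySem.Set.ofList xs).Pairwise (fun a b => xs.idxOf a < xs.idxOf b) := by
  intro xs
  induction xs with
  | nil => simp [PySem.Set.ofList_nil]
  | cons x t ih =>
    rw [PySem.Set.ofList_cons]
    constructor
    · intro b hb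
      have hbt : b ∈ PySem.Set.ofList t ∧ b ≠ x := by
        exact (PySem.Set.mem_discard _ _ _).mp hb
      rw [List.idxOf_cons_self, List.idxOf_cons_ne _ (Ne.symm hbt.2)]
      exact Nat.succ_pos _
    · have hsub : (PySem.Set.discard (PySem.Set.ofList t) x).Sublist (PySem.Set.ofList t) := by
        simp only [PySem.Set.discard]
        exact List.filter_sublist
      have hpw := (ih.sublist hsub)
      refine hpw.imp_of_mem ?_
      intro a b ha hb hab
      have hax : a ≠ x := ((PySem.Set.mem_discard _ _ _).mp ha).2
      have hbx : b ≠ x := ((PySem.Set.mem_discard _ _ _).mp hb).2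
      rw [List.idxOf_cons_ne _ (Ne.symm hax), List.idxOf_cons_ne _ (Ne.symm hbx)]
      exact Nat.succ_lt_succ hab

-- ===== VERDICT (by name: the statement is the Claim_ definition above) =====
theorem roadDict_spec : Claim_equal_roadDict := by
  intro route_list _
  show roadDict route_list = roadDict_alt route_list
  rw [pvA_closed]
  unfold roadDict_alt
  simp only []
  set es := route_list.flatMap
    (fun route => (route.zip route.tail).map (fun p => (min p.1 p.2, max p.1 p.2))) with hes
  -- rewrite B's index loop into the fold over (enumerate es 0).reverse
  have hrange : PySem.List.pyRange ((es.length : Int) - 1) (-1) (-1)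
      = (PySem.List.pyRange 0 (es.length : Int) 1).reverse := by
    rw [PySem.List.pyRange_neg_one_eq_reverse]
    norm_num
  have henum : PySem.List.enumerate es 0
      = (PySem.List.pyRange 0 (es.length : Int) 1).map
          (fun j => (j, PySem.List.pyGetD es j ((0, 0) : Int × Int))) := by
    have h := PySem.List.enumerate_eq_map_pyRange es ((0, 0) : Int × Int)
    simpa using h
  have hfold :
      (PySem.List.pyRange ((es.length : Int) - 1) (-1) (-1)).foldl
        (fun (d : PySem.Dict (Int × Int) Int) pos => d.insert (PySem.List.pyGetD es pos (0, 0)) pos)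
        PySem.Dict.empty
      = ((PySem.List.enumerate es 0).reverse).foldl
        (fun (d : PySem.Dict (Int × Int) Int) p => d.insert p.2 p.1) PySem.Dict.empty := by
    rw [hrange, henum, ← List.map_reverse, List.foldl_map]
  rw [hfold]
  set first := ((PySem.List.enumerate es 0).reverse).foldl
    (fun (d : PySem.Dict (Int × Int) Int) p => d.insert p.2 p.1) PySem.Dict.empty with hfirst
  -- the sorted key list is exactly the ordered dedup of es
  have hkeys : first.keys = PySem.Set.ofList es.reverse := by
    rw [hfirst]
    rw [pvFirstKeys ((PySem.List.enumerate es 0).reverse) PySem.Dict.empty]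
    rw [List.map_reverse, PySem.List.map_snd_enumerate]
    simp only [PySem.Dict.keys_empty]
    exact PySem.Set.update_nil_left es.reverse
  have hsorted : PySem.List.sorted first.keys (fun e => first.getD e 0) false
      = PySem.List.dedup es := by
    apply PySem.List.sorted_eq_of_perm_of_pairwise_lt
    · -- dedup es is a permutation of first.keys
      rw [hkeys, PySem.List.dedup_eq_ofList]
      rw [List.perm_ext_iff_of_nodup (PySem.Set.nodup_ofList _) (PySem.Set.nodup_ofList _)]
      intro a
      rw [PySem.Set.mem_ofList, PySem.Set.mem_ofList, List.mem_reverse]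
    · -- dedup es is strictly increasing in the recorded first position
      have hpw := pvDedupPairwise es
      rw [PySem.List.dedup_eq_ofList]
      refine hpw.imp_of_mem ?_
      intro a b ha hb hab
      have haes : a ∈ es := (PySem.Set.mem_ofList _ _).mp ha
      have hbes : b ∈ es := (PySem.Set.mem_ofList _ _).mp hb
      have hga : first.getD a 0 = (es.idxOf a : Int) := by
        rw [hfirst, pvFirstGetD, if_pos haes]; ring
      have hgb : first.getD b 0 = (es.idxOf b : Int) := by
        rw [hfirst, pvFirstGetD, if_pos hbes]; ring
      rw [hga, hgb]
      exact_mod_cast hab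
  rw [hsorted]
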